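-- pv_equiv track=rewrite | github.com/zowelqqee/JARVIS | aria/oled_formatter.py | format_for_oled
-- ===== SOURCE A (Python) =====
-- LINE_WIDTH = 20
--
-- MAX_LINES  = 4
--
-- def format_for_oled(text: str) -> list[str]:
--     """
--     Split *text* into at most MAX_LINES lines of at most LINE_WIDTH chars.
--     Words are not broken — long single words get their own line truncated at LINE_WIDTH.
--     Returns a list of 1–4 strings.
--     """
--     words  = text.split()
--     lines: list[str] = []
--     current = ""
--
--     for word in words:
--         if len(lines) >= MAX_LINES:
--             break
--
--         # Truncate a single word that exceeds LINE_WIDTH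
--         if len(word) > LINE_WIDTH:
--             word = word[:LINE_WIDTH]
--
--         if not current:
--             current = word
--         elif len(current) + 1 + len(word) <= LINE_WIDTH:
--             current = current + " " + word
--         else:
--             lines.append(current)
--             if len(lines) >= MAX_LINES:
--                 break
--             current = word
--
--     if current and len(lines) < MAX_LINES:
--         lines.append(current)
--
--     return lines or [""]
-- ===== SOURCE B (Python) =====
-- LINE_WIDTH = 20
--
-- MAX_LINES = 4
--
-- def format_for_oled(text: str) -> list[str]:
--     """Recursive wrapper: each call peels off one greedily filled line; cap at MAX_LINES at the end."""
--     def wrap(words):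
--         if not words:
--             return []
--         line = words[0][:LINE_WIDTH]
--         i = 1
--         while i < len(words):
--             w = words[i][:LINE_WIDTH]
--             if len(line) + 1 + len(w) > LINE_WIDTH:
--                 break
--             line = line + " " + w
--             i += 1
--         return [line] + wrap(words[i:])
--
--     lines = wrap(text.split())[:MAX_LINES]
--     return lines if lines else [""]
-- ===== Notes on version B (the rewrite author's own statement) =====
-- stated objective: simpler
-- what changed: Replaced the single stateful loop with interleaved MAX_LINES break checks by a recursive wrapper that peels off one greedy line per call with no line limit, applying the 4-line cap as a final slice.
import Mathlib
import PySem

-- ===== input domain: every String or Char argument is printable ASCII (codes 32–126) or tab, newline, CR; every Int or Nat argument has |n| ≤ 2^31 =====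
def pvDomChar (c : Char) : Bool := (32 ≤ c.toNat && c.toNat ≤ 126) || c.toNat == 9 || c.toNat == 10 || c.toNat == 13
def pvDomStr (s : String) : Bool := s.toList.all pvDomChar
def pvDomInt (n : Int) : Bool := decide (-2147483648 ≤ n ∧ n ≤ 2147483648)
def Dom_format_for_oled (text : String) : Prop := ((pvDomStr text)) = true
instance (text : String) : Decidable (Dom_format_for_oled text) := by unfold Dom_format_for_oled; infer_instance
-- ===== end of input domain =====

-- B replaces A's single stateful loop with interleaved MAX_LINES break checks by a recursive
-- wrapper peeling off one greedy line per recursive call with no limit, capping at 4 lines by a final slice (simpler).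

-- ===== PORT A =====
-- word[:20] applied only when len(word) > 20, as A writes it
def pvTruncA (w : List Char) : List Char :=
  if w.length > 20 then PySem.List.slice w none (some 20) else w

-- the for-loop of A over the words, state (lines, current); early 'break' = immediate return
def pvLoopA : List (List Char) → List (List Char) → List Char → List (List Char) × List Char
  | [], lines, current => (lines, current)
  | w :: ws, lines, current =>
    if lines.length ≥ 4 then (lines, current)
    else
      let w' := pvTruncA w
      if current.isEmpty then pvLoopA ws lines w'
      else if current.length + 1 + w'.length ≤ 20 then pvLoopA ws lines (current ++ ' ' :: w')
      else
        let lines' := lines ++ [current]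
        if lines'.length ≥ 4 then (lines', current)
        else pvLoopA ws lines' w'

def format_for_oled (text : String) : List String :=
  let words := PySem.Chars.split₀ text.toList
  let p := pvLoopA words [] []
  let lines := if ¬ p.2.isEmpty ∧ p.1.length < 4 then p.1 ++ [p.2] else p.1
  (if lines.isEmpty then [[]] else lines).map String.ofList

-- ===== PORT B =====
-- word[:20], as B writes it (unconditional slice)
def pvTruncB (w : List Char) : List Char := PySem.List.slice w none (some 20)

-- B's inner while loop: extend `line` with truncated words while they fit, return the rest
def pvTakeLine (line : List Char) : List (List Char) → List Char × List (List Char)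
  | [] => (line, [])
  | w :: ws =>
    let w' := pvTruncB w
    if line.length + 1 + w'.length > 20 then (line, w :: ws)
    else pvTakeLine (line ++ ' ' :: w') ws

theorem pvTakeLine_rest_le (line : List Char) (ws : List (List Char)) :
    (pvTakeLine line ws).2.length ≤ ws.length := by
  induction ws generalizing line with
  | nil => simp [pvTakeLine]
  | cons w ws ih =>
    simp only [pvTakeLine]
    split
    · simp
    · exact le_trans (ih _) (by simp)

-- B's recursive wrap: each call peels off one greedily filled line, no line-count limit
def pvWrap : List (List Char) → List (List Char)
  | [] => []
  | w :: ws =>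
    let p := pvTakeLine (pvTruncB w) ws
    p.1 :: pvWrap p.2
  termination_by ws => ws.length
  decreasing_by
    simpa using Nat.lt_succ_of_le (pvTakeLine_rest_le (pvTruncB w) ws)

def format_for_oled_alt (text : String) : List String :=
  let lines := (pvWrap (PySem.Chars.split₀ text.toList)).take 4
  (if lines.isEmpty then [[]] else lines).map String.ofList

-- ===== PRECONDITION & SPEC =====
def Spec_format_for_oled (text : String) (out : List String) : Prop := out = format_for_oled_alt text
instance (text : String) (out : List String) : Decidable (Spec_format_for_oled text out) := by unfold Spec_format_for_oled; infer_instance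

-- ===== CLAIM (what is proved, stated in full; the proofs are below) =====
def Claim_equal_format_for_oled : Prop := ∀ (text : String), Dom_format_for_oled text → Spec_format_for_oled text (format_for_oled text)

-- ===== LEMMAS AND PROOFS =====

-- every word produced by str.split() is nonempty
theorem pvSplitGo_ne_nil (s : List Char) : ∀ (cur : List Char) (acc : List (List Char)),
    (∀ w ∈ acc, w ≠ []) → ∀ w ∈ PySem.Chars.split₀.go s cur acc, w ≠ [] := by
  induction s with
  | nil =>
    intro cur acc hacc w hw
    simp only [PySem.Chars.split₀.go] at hw
    split at hw
    · exact hacc w (List.mem_reverse.mp hw)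
    · rw [List.mem_reverse, List.mem_cons] at hw
      rcases hw with rfl | h
      · next hne => simp_all [List.isEmpty_iff]
      · exact hacc w h
  | cons c rest ih =>
    intro cur acc hacc w hw
    simp only [PySem.Chars.split₀.go] at hw
    split at hw
    · split at hw
      · exact ih [] acc hacc w hw
      · refine ih [] _ ?_ w hw
        intro v hv
        rw [List.mem_cons] at hv
        rcases hv with rfl | h
        · next hne _ => simp_all [List.isEmpty_iff]
        · exact hacc v h
    · exact ih (c :: cur) acc hacc w hw

theorem pvSplit_ne_nil (cs : List Char) : ∀ w ∈ PySem.Chars.split₀ cs, w ≠ [] := by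
  simpa [PySem.Chars.split₀] using pvSplitGo_ne_nil cs [] [] (by simp)

theorem pvTruncB_take (w : List Char) : pvTruncB w = w.take 20 := by
  unfold pvTruncB
  rw [PySem.List.slice_to w (by norm_num : (0:Int) ≤ 20)]
  rfl

theorem pvTrunc_eq (w : List Char) : pvTruncA w = pvTruncB w := by
  rw [pvTruncB_take]
  unfold pvTruncA
  rw [PySem.List.slice_to w (by norm_num : (0:Int) ≤ 20)]
  split
  · rfl
  · next h => rw [List.take_of_length_le (by omega)]

theorem pvTruncB_ne_nil (w : List Char) (h : w ≠ []) : (pvTruncB w).isEmpty = false := by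
  rw [pvTruncB_take]
  cases w with
  | nil => exact absurd rfl h
  | cons a l => simp

-- take-4 arithmetic
theorem pvTake4_app4 {α : Type} (l t : List α) (h : l.length = 4) : (l ++ t).take 4 = l := by
  rw [List.take_append, h]
  simp [List.take_of_length_le (le_of_eq h)]

theorem pvTake4_app3 {α : Type} (l : List α) (x : α) (t : List α) (h : l.length = 3) :
    (l ++ x :: t).take 4 = l ++ [x] := by
  rw [List.take_append, h, List.take_of_length_le (by omega)]
  simp

-- step lemmas for A's loop
theorem pvLoopA_stop (w : List Char) (ws : List (List Char)) (lines : List (List Char)) (cur : List Char)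
    (h : lines.length ≥ 4) : pvLoopA (w :: ws) lines cur = (lines, cur) := by
  simp [pvLoopA, h]

theorem pvLoopA_empty (w : List Char) (ws : List (List Char)) (lines : List (List Char)) (cur : List Char)
    (h4 : ¬ lines.length ≥ 4) (hc : cur.isEmpty = true) :
    pvLoopA (w :: ws) lines cur = pvLoopA ws lines (pvTruncA w) := by
  simp [pvLoopA, h4, hc]

theorem pvLoopA_fit (w : List Char) (ws : List (List Char)) (lines : List (List Char)) (cur : List Char)
    (h4 : ¬ lines.length ≥ 4) (hc : cur.isEmpty = false)
    (hfit : cur.length + 1 + (pvTruncA w).length ≤ 20) :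
    pvLoopA (w :: ws) lines cur = pvLoopA ws lines (cur ++ ' ' :: pvTruncA w) := by
  simp [pvLoopA, h4, hc, hfit]

theorem pvLoopA_push_break (w : List Char) (ws : List (List Char)) (lines : List (List Char)) (cur : List Char)
    (hc : cur.isEmpty = false) (hfit : ¬ cur.length + 1 + (pvTruncA w).length ≤ 20)
    (h3 : lines.length = 3) :
    pvLoopA (w :: ws) lines cur = (lines ++ [cur], cur) := by
  simp [pvLoopA, hc, hfit, h3]

theorem pvLoopA_push (w : List Char) (ws : List (List Char)) (lines : List (List Char)) (cur : List Char)
    (hc : cur.isEmpty = false) (hfit : ¬ cur.length + 1 + (pvTruncA w).length ≤ 20)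
    (h3 : lines.length < 3) :
    pvLoopA (w :: ws) lines cur = pvLoopA ws (lines ++ [cur]) (pvTruncA w) := by
  have h4 : ¬ lines.length ≥ 4 := by omega
  simp [pvLoopA, h4, hc, hfit]
  intro h5
  exact absurd h5 (by omega)

-- step lemmas for B's wrap
theorem pvWrap_cons (w : List Char) (ws : List (List Char)) :
    pvWrap (w :: ws) = (pvTakeLine (pvTruncB w) ws).1 :: pvWrap (pvTakeLine (pvTruncB w) ws).2 := by
  rw [pvWrap]

-- A's loop followed by the final 'if current: lines.append(current)' of A
def pvAfin (ws : List (List Char)) (lines : List (List Char)) (cur : List Char) : List (List Char) :=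
  let p := pvLoopA ws lines cur
  if ¬ p.2.isEmpty ∧ p.1.length < 4 then p.1 ++ [p.2] else p.1

-- B's unlimited wrap, seeded with a possibly nonempty current line
def pvBfull (cur : List Char) (ws : List (List Char)) : List (List Char) :=
  if cur.isEmpty then pvWrap ws
  else (pvTakeLine cur ws).1 :: pvWrap (pvTakeLine cur ws).2

theorem pvBfull_empty (cur : List Char) (ws : List (List Char)) (hc : cur.isEmpty = true) :
    pvBfull cur ws = pvWrap ws := by
  simp [pvBfull, hc]

theorem pvBfull_start (cur : List Char) (w : List Char) (ws : List (List Char))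
    (hc : cur.isEmpty = true) (hw : (pvTruncB w).isEmpty = false) :
    pvBfull cur (w :: ws) = pvBfull (pvTruncB w) ws := by
  rw [pvBfull_empty _ _ hc, pvWrap_cons]
  simp [pvBfull, hw]

theorem pvBfull_fit (cur : List Char) (w : List Char) (ws : List (List Char))
    (hc : cur.isEmpty = false) (hfit : ¬ cur.length + 1 + (pvTruncB w).length > 20) :
    pvBfull cur (w :: ws) = pvBfull (cur ++ ' ' :: pvTruncB w) ws := by
  unfold pvBfull
  simp only [hc, Bool.false_eq_true, if_false, pvTakeLine, hfit]
  simp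

theorem pvBfull_nofit (cur : List Char) (w : List Char) (ws : List (List Char))
    (hc : cur.isEmpty = false) (hw : (pvTruncB w).isEmpty = false)
    (hfit : cur.length + 1 + (pvTruncB w).length > 20) :
    pvBfull cur (w :: ws) = cur :: pvBfull (pvTruncB w) ws := by
  unfold pvBfull
  simp only [hc, Bool.false_eq_true, if_false, hw, pvTakeLine, hfit, if_pos]
  rw [pvWrap_cons]

-- the invariant: A's capped loop + final append = B's unlimited wrap, truncated to 4 lines
theorem pvMain (ws : List (List Char)) : ∀ (lines : List (List Char)) (cur : List Char),
    (∀ w ∈ ws, w ≠ []) → lines.length ≤ 4 →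
    pvAfin ws lines cur = (lines ++ pvBfull cur ws).take 4 := by
  induction ws with
  | nil =>
    intro lines cur _ hlen
    unfold pvAfin pvBfull
    simp only [pvLoopA, pvWrap, pvTakeLine]
    by_cases hc : cur.isEmpty
    · simp [hc, List.take_of_length_le hlen]
    · have hc' : cur.isEmpty = false := by simpa using hc
      by_cases h4 : lines.length < 4
      · simp [hc', h4, List.take_of_length_le (show (lines ++ [cur]).length ≤ 4 by simp; omega)]
      · have hl4 : lines.length = 4 := by omega
        simp [hc', h4, pvTake4_app4 lines _ hl4]
  | cons w ws ih =>
    intro lines cur hne hlen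
    have hw : w ≠ [] := hne w (by simp)
    have hwB : (pvTruncB w).isEmpty = false := pvTruncB_ne_nil w hw
    have hws : ∀ v ∈ ws, v ≠ [] := fun v hv => hne v (by simp [hv])
    by_cases h4 : lines.length ≥ 4
    · have hl4 : lines.length = 4 := by omega
      unfold pvAfin
      rw [pvLoopA_stop _ _ _ _ h4]
      rw [if_neg (by simp [hl4]), pvTake4_app4 lines _ hl4]
    · by_cases hc : cur.isEmpty
      · -- current empty: A sets current := truncated word; B starts a new line with it
        unfold pvAfin
        rw [pvLoopA_empty _ _ _ _ h4 hc]
        have := ih lines (pvTruncA w) hws hlen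
        unfold pvAfin at this
        rw [this, pvTrunc_eq, pvBfull_start cur w ws hc hwB]
      · have hc' : cur.isEmpty = false := by simpa using hc
        by_cases hfit : cur.length + 1 + (pvTruncA w).length ≤ 20
        · -- word fits: both extend the current line
          unfold pvAfin
          rw [pvLoopA_fit _ _ _ _ h4 hc' hfit]
          have := ih lines (cur ++ ' ' :: pvTruncA w) hws hlen
          unfold pvAfin at this
          rw [this, pvTrunc_eq, pvBfull_fit cur w ws hc' (by rw [← pvTrunc_eq]; omega)]
        · -- word does not fit: A pushes current; B's takeLine stops here
          have hfitB : cur.length + 1 + (pvTruncB w).length > 20 := by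
            rw [← pvTrunc_eq]; omega
          rw [pvBfull_nofit cur w ws hc' hwB hfitB]
          by_cases h3 : lines.length ≥ 3
          · -- the push fills the 4th line: A breaks, discarding current
            have hl3 : lines.length = 3 := by omega
            unfold pvAfin
            rw [pvLoopA_push_break _ _ _ _ hc' hfit hl3]
            rw [if_neg (by simp [hl3]), pvTake4_app3 lines cur _ hl3]
          · -- room remains: A keeps looping with the pushed line
            unfold pvAfin
            rw [pvLoopA_push _ _ _ _ hc' hfit (by omega)]
            have := ih (lines ++ [cur]) (pvTruncA w) hws (by simp; omega)
            unfold pvAfin at this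
            rw [this, pvTrunc_eq, List.append_assoc]
            rfl

-- ===== VERDICT (by name: the statement is the Claim_ definition above) =====
theorem format_for_oled_spec : Claim_equal_format_for_oled := by
  intro text _
  unfold Spec_format_for_oled format_for_oled format_for_oled_alt
  have h := pvMain (PySem.Chars.split₀ text.toList) [] []
    (pvSplit_ne_nil text.toList) (by simp)
  unfold pvAfin at h
  rw [pvBfull_empty _ _ (by simp)] at h
  simp only [List.nil_append] at h
  simp only [h]
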